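-- pv_equiv track=rewrite | github.com/sgsmob/toboggan | toboggan/flow.py | _compute_multiset_bound
-- ===== SOURCE A (Python) =====
-- import math
-- from collections import defaultdict
--
-- def _compute_multiset_bound(list1, list2):
--     """
--     Treat twolists as multisets, return list1-list2.
--     Note: input lists should contain int or float type.
--     """
--     # convert to dicts with contents as keys, multiplicities as vals
--     size1 = len(list1)
--     size2 = len(list2)
--
--     dict1 = defaultdict(int)
--     for item in list1:
--         dict1[item] += 1
--     dict2 = defaultdict(int)
--     for item in list2:
--         dict2[item] += 1
--     num_repeated = 0
--     for key, val in dict1.items():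
--         num_repeated += min(val, dict2[key])
--     size1 -= num_repeated
--     size2 -= num_repeated
--     return num_repeated + math.ceil(max(size1, size2)/3) + \
--         min(size1, size2)
-- ===== SOURCE B (Python) =====
-- import math
--
-- def _compute_multiset_bound(list1, list2):
--     """Same bound, but the multiset-intersection size is found by a sorted
--     two-pointer merge instead of building two multiplicity dicts."""
--     size1 = len(list1)
--     size2 = len(list2)
--     a = sorted(list1)
--     b = sorted(list2)
--     i = 0
--     j = 0
--     num_repeated = 0
--     while i < size1 and j < size2:
--         if a[i] == b[j]:
--             num_repeated += 1
--             i += 1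
--             j += 1
--         elif a[i] < b[j]:
--             i += 1
--         else:
--             j += 1
--     size1 -= num_repeated
--     size2 -= num_repeated
--     return num_repeated + math.ceil(max(size1, size2)/3) + \
--         min(size1, size2)
-- ===== Notes on version B (the rewrite author's own statement) =====
-- stated objective: alternative
-- what changed: Replaces the two multiplicity dictionaries with sorting both lists and counting the multiset intersection by a two-pointer merge; the final bound formula is unchanged.
import Mathlib
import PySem

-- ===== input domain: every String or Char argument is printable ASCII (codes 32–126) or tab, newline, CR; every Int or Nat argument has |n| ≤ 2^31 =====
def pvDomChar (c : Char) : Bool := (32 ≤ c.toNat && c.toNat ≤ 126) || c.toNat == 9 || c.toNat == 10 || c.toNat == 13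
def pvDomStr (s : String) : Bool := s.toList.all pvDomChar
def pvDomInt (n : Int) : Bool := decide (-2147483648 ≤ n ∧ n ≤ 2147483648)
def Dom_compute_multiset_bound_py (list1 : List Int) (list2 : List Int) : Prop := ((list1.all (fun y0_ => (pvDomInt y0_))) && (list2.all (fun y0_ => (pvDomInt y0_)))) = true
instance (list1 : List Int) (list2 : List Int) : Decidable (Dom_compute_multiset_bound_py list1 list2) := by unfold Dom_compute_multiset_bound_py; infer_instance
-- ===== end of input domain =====

-- B replaces the two multiplicity dictionaries by a sorted two-pointer merge that counts
-- the multiset intersection; the final bound formula is unchanged (alternative, not faster).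

-- ===== PORT A =====
def compute_multiset_bound_py (list1 : List Int) (list2 : List Int) : Int :=
  let size1 : Int := list1.length
  let size2 : Int := list2.length
  let dict1 := list1.foldl (fun d x => d.modify x 0 (· + 1)) (PySem.Dict.empty : PySem.Dict Int Int)
  let dict2 := list2.foldl (fun d x => d.modify x 0 (· + 1)) (PySem.Dict.empty : PySem.Dict Int Int)
  let num_repeated : Int := dict1.items.foldl (fun acc kv => acc + min kv.2 (dict2.getD kv.1 0)) 0
  let size1 := size1 - num_repeated
  let size2 := size2 - num_repeated
  -- math.ceil(x/3) on an int x is exactly -((-x) // 3)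
  num_repeated + (-(PySem.Int.floordiv (-(max size1 size2)) 3)) + min size1 size2

-- ===== PORT B =====
-- the two-pointer while loop of Source B, as structural recursion on the two (sorted) lists
def mergeRepeated (l1 : List Int) (l2 : List Int) : Int :=
  match l1, l2 with
  | [], _ => 0
  | _ :: _, [] => 0
  | a :: t1, b :: t2 =>
      if a = b then 1 + mergeRepeated t1 t2
      else if a < b then mergeRepeated t1 (b :: t2)
      else mergeRepeated (a :: t1) t2
termination_by l1.length + l2.length

def compute_multiset_bound_py_alt (list1 : List Int) (list2 : List Int) : Int :=
  let size1 : Int := list1.length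
  let size2 : Int := list2.length
  let a := PySem.List.sorted list1 (fun x => x) false
  let b := PySem.List.sorted list2 (fun x => x) false
  let num_repeated := mergeRepeated a b
  let size1 := size1 - num_repeated
  let size2 := size2 - num_repeated
  num_repeated + (-(PySem.Int.floordiv (-(max size1 size2)) 3)) + min size1 size2

-- ===== PRECONDITION & SPEC =====
def Spec_compute_multiset_bound_py (list1 : List Int) (list2 : List Int) (out : Int) : Prop := out = compute_multiset_bound_py_alt list1 list2
instance (list1 : List Int) (list2 : List Int) (out : Int) : Decidable (Spec_compute_multiset_bound_py list1 list2 out) := by unfold Spec_compute_multiset_bound_py; infer_instance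

-- ===== CLAIM (what is proved, stated in full; the proofs are below) =====
def Claim_equal_compute_multiset_bound_py : Prop := ∀ (list1 : List Int) (list2 : List Int), Dom_compute_multiset_bound_py list1 list2 → Spec_compute_multiset_bound_py list1 list2 (compute_multiset_bound_py list1 list2)

-- ===== LEMMAS AND PROOFS =====

-- B side: the merge count on two nondecreasing lists is the multiset-intersection size
theorem not_mem_of_lt_head (a b : Int) (t : List Int) (hab : a < b)
    (h : (b :: t).Pairwise (· ≤ ·)) : a ∉ (b :: t) := by
  intro hm
  rcases List.mem_cons.1 hm with rfl | hm
  · exact absurd hab (lt_irrefl a)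
  · exact absurd (lt_of_lt_of_le hab ((List.pairwise_cons.1 h).1 a hm)) (lt_irrefl a)

theorem mergeRepeated_eq_card : ∀ (l1 l2 : List Int), l1.Pairwise (· ≤ ·) → l2.Pairwise (· ≤ ·) →
    mergeRepeated l1 l2 = (((l1 : Multiset Int)) ∩ (l2 : Multiset Int)).card := by
  intro l1
  induction l1 with
  | nil => intro l2 _ _; simp [mergeRepeated]
  | cons a t1 ih1 =>
    intro l2
    induction l2 with
    | nil => intro _ _; simp [mergeRepeated]
    | cons b t2 ih2 =>
      intro h1 h2
      by_cases hab : a = b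
      · subst hab
        have hmem : a ∈ (a ::ₘ (t2 : Multiset Int)) := Multiset.mem_cons_self a _
        have hinter : ((a :: t1 : List Int) : Multiset Int) ∩ ((a :: t2 : List Int) : Multiset Int)
            = a ::ₘ ((t1 : Multiset Int) ∩ (t2 : Multiset Int)) := by
          rw [← Multiset.cons_coe, ← Multiset.cons_coe, Multiset.cons_inter_of_pos _ hmem,
            Multiset.erase_cons_head]
        rw [hinter]
        simp only [mergeRepeated, Multiset.card_cons,
          ih1 t2 (List.Pairwise.of_cons h1) (List.Pairwise.of_cons h2)]
        push_cast
        ring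
      · rcases lt_or_gt_of_ne hab with hlt | hgt
        · have hnm : a ∉ ((b :: t2 : List Int) : Multiset Int) := by
            rw [Multiset.mem_coe]; exact not_mem_of_lt_head a b t2 hlt h2
          have hinter : ((a :: t1 : List Int) : Multiset Int) ∩ ((b :: t2 : List Int) : Multiset Int)
              = ((t1 : Multiset Int)) ∩ ((b :: t2 : List Int) : Multiset Int) := by
            rw [← Multiset.cons_coe, Multiset.cons_inter_of_neg _ hnm]
          rw [hinter, ← ih1 (b :: t2) (List.Pairwise.of_cons h1) h2]
          simp [mergeRepeated, hab, hlt]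
        · have hnm : b ∉ ((a :: t1 : List Int) : Multiset Int) := by
            rw [Multiset.mem_coe]; exact not_mem_of_lt_head b a t1 hgt h1
          have hinter : ((a :: t1 : List Int) : Multiset Int) ∩ ((b :: t2 : List Int) : Multiset Int)
              = ((a :: t1 : List Int) : Multiset Int) ∩ ((t2 : Multiset Int)) := by
            rw [Multiset.inter_comm, ← Multiset.cons_coe, Multiset.cons_inter_of_neg _ hnm,
              Multiset.inter_comm]
          rw [hinter, ← ih2 h1 (List.Pairwise.of_cons h2)]
          have hnlt : ¬ a < b := by omega
          simp [mergeRepeated, hab, hnlt]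

-- A side: the sum of min-multiplicities over the distinct keys is the same size
theorem finset_min_count_eq_card (l1 l2 : List Int) :
    (l1.toFinset.sum fun k => min (l1.count k) (l2.count k))
      = (((l1 : Multiset Int)) ∩ (l2 : Multiset Int)).card := by
  set s : Multiset Int := ((l1 : Multiset Int)) ∩ (l2 : Multiset Int) with hs
  have hcount : ∀ k : Int, s.count k = min (l1.count k) (l2.count k) := by
    intro k
    rw [hs, Multiset.count_inter, Multiset.coe_count, Multiset.coe_count]
  have hsub : s.toFinset ⊆ l1.toFinset := by
    intro a ha
    rw [Multiset.mem_toFinset] at ha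
    rw [List.mem_toFinset, ← Multiset.mem_coe]
    exact (Multiset.mem_inter.1 ha).1
  have hzero : ∀ a ∈ l1.toFinset, a ∉ s.toFinset → min (l1.count a) (l2.count a) = 0 := by
    intro a _ ha
    rw [Multiset.mem_toFinset] at ha
    rw [← hcount a]
    exact Multiset.count_eq_zero.2 ha
  calc (l1.toFinset.sum fun k => min (l1.count k) (l2.count k))
      = s.toFinset.sum fun k => min (l1.count k) (l2.count k) :=
        (Finset.sum_subset hsub hzero).symm
    _ = s.toFinset.sum fun k => s.count k :=
        Finset.sum_congr rfl (fun k _ => (hcount k).symm)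
    _ = s.card := Multiset.toFinset_sum_count_eq s

theorem listsum_min_count_eq_card (l1 l2 : List Int) :
    ((PySem.Set.ofList l1).map fun k => ((min (l1.count k) (l2.count k) : Nat) : Int)).sum
      = ((((l1 : Multiset Int)) ∩ (l2 : Multiset Int)).card : Int) := by
  have h1 : ((PySem.Set.ofList l1).map fun k => ((min (l1.count k) (l2.count k) : Nat) : Int)).sum
      = (((PySem.Set.ofList l1).map fun k => min (l1.count k) (l2.count k)).sum : Int) := by
    rw [Nat.cast_list_sum, List.map_map]; rfl
  have h2 : ((PySem.Set.ofList l1).map fun k => min (l1.count k) (l2.count k)).sum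
      = (((l1 : Multiset Int)) ∩ (l2 : Multiset Int)).card := by
    have hnd : (PySem.Set.ofList l1).Nodup := PySem.Set.nodup_ofList l1
    have hF : (PySem.Set.ofList l1).toFinset = l1.toFinset := by
      ext a
      simp [List.mem_toFinset, PySem.Set.mem_ofList]
    rw [← List.sum_toFinset _ hnd, hF, finset_min_count_eq_card]
  rw [h1, h2]

theorem foldl_add_min (l : List (Int × Int)) (g : Int → Int) : ∀ (init : Int),
    l.foldl (fun acc kv => acc + min kv.2 (g kv.1)) init
      = init + (l.map fun kv => min kv.2 (g kv.1)).sum := by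
  induction l with
  | nil => intro init; simp
  | cons p t ih => intro init; simp [List.foldl_cons, ih]; ring

theorem countersA_eq_card (l1 l2 : List Int) :
    (l1.foldl (fun d x => d.modify x 0 (· + 1)) (PySem.Dict.empty : PySem.Dict Int Int)).items.foldl
      (fun acc kv => acc + min kv.2 ((l2.foldl (fun d x => d.modify x 0 (· + 1)) (PySem.Dict.empty : PySem.Dict Int Int)).getD kv.1 0)) 0
      = ((((l1 : Multiset Int)) ∩ (l2 : Multiset Int)).card : Int) := by
  rw [← PySem.Dict.counter_eq_foldl, ← PySem.Dict.counter_eq_foldl,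
    foldl_add_min _ (fun k => (PySem.Dict.counter l2).getD k 0), PySem.Dict.items_counter,
    List.map_map]
  have hmap : ((fun kv : Int × Int => min kv.2 ((PySem.Dict.counter l2).getD kv.1 0)) ∘
      fun k => (k, (l1.count k : Int)))
      = fun k => ((min (l1.count k) (l2.count k) : Nat) : Int) := by
    funext k
    simp only [Function.comp, PySem.Dict.getD_counter]
    push_cast
    rfl
  rw [hmap, listsum_min_count_eq_card, zero_add]

theorem sorted_coe (l : List Int) :
    ((PySem.List.sorted l (fun x => x) false : List Int) : Multiset Int) = (l : Multiset Int) :=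
  Multiset.coe_eq_coe.2 (PySem.List.sorted_perm l _ _)

theorem numB_eq_card (l : List Int) (l' : List Int) :
    mergeRepeated (PySem.List.sorted l (fun x => x) false) (PySem.List.sorted l' (fun x => x) false)
      = ((((l : Multiset Int)) ∩ (l' : Multiset Int)).card : Int) := by
  rw [mergeRepeated_eq_card _ _ (PySem.List.sorted_pairwise l _) (PySem.List.sorted_pairwise l' _),
    sorted_coe, sorted_coe]

-- ===== VERDICT (by name: the statement is the Claim_ definition above) =====
theorem compute_multiset_bound_py_spec : Claim_equal_compute_multiset_bound_py := by
  intro list1 list2 _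
  unfold Spec_compute_multiset_bound_py compute_multiset_bound_py compute_multiset_bound_py_alt
  simp only [countersA_eq_card, numB_eq_card]
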